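-- pv_equiv track=rewrite | github.com/Anton-Dahlstrom/Leetcode | 3839_number_of_prefix_connected_groups.py | prefixConnected
-- ===== SOURCE A (Python) =====
-- from typing import List
--
-- def prefixConnected(words: List[str], k: int) -> int:
--     singles = set()
--     doubles = set()
--     for word in words:
--         if len(word) < k:
--             continue
--         prefix = word[:k]
--         if prefix in singles:
--             doubles.add(prefix)
--         else:
--             singles.add(prefix)
--     return len(doubles)
-- ===== SOURCE B (Python) =====
-- def prefixConnected(words, k):
--     ps = [w[:k] for w in words if len(w) >= k]
--     ans = 0
--     while ps:
--         p = ps[0]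
--         if ps.count(p) >= 2:
--             ans += 1
--         ps = [q for q in ps if q != p]
--     return ans
-- ===== Notes on version B (the rewrite author's own statement) =====
-- stated objective: alternative
-- what changed: Replaces the online seen-once/seen-twice set tracking with a count-and-remove loop: build the list of length-k prefixes, then repeatedly take the first remaining prefix, tally it if it occurs at least twice, and delete all its occurrences.
import Mathlib
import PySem

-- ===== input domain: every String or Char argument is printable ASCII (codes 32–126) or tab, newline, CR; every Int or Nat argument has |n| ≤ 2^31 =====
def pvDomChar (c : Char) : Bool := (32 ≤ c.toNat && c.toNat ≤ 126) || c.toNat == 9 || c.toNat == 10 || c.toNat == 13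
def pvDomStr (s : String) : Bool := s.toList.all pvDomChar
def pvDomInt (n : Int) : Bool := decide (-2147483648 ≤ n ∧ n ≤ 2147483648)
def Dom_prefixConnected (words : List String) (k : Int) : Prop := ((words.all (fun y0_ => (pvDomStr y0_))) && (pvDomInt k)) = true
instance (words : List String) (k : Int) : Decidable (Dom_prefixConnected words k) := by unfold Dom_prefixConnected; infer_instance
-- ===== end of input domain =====

-- B replaces A's online seen-once/seen-twice set tracking with a count-and-remove loop over
-- the prefix list: take the first remaining prefix, tally it if it occurs at least twice,
-- delete all its occurrences, repeat (objective: alternative; no speed claim).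

-- ===== PORT A =====
def prefixConnected (words : List String) (k : Int) : Int :=
  let r := words.foldl
    (fun (sd : PySem.Set String × PySem.Set String) word =>
      if PySem.Str.len word < k then sd
      else
        let pre := PySem.Str.slice word none (some k)
        if sd.1.contains pre then (sd.1, sd.2.add pre)
        else (sd.1.add pre, sd.2))
    (PySem.Set.empty, PySem.Set.empty)
  (r.2.length : Int)

-- ===== PORT B =====
-- B's while-loop: head prefix, count it in the current list, drop all its occurrences.
def pvLoopB : List String → Int
  | [] => 0
  | x :: xs =>
      (if 2 ≤ PySem.List.count (x :: xs) x then (1 : Int) else 0)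
        + pvLoopB ((x :: xs).filter (fun q => decide (q ≠ x)))
termination_by ps => ps.length
decreasing_by
  simp only [List.filter_cons, ne_eq, not_true_eq_false, decide_false, List.length_cons]
  exact Nat.lt_succ_of_le (List.length_filter_le _ _)

def prefixConnected_alt (words : List String) (k : Int) : Int :=
  pvLoopB
    ((words.filter (fun w => decide (k ≤ PySem.Str.len w))).map
      (fun w => PySem.Str.slice w none (some k)))

-- ===== PRECONDITION & SPEC =====
def Spec_prefixConnected (words : List String) (k : Int) (out : Int) : Prop := out = prefixConnected_alt words k
instance (words : List String) (k : Int) (out : Int) : Decidable (Spec_prefixConnected words k out) := by unfold Spec_prefixConnected; infer_instance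

-- ===== CLAIM (what is proved, stated in full; the proofs are below) =====
def Claim_equal_prefixConnected : Prop := ∀ (words : List String) (k : Int), Dom_prefixConnected words k → Spec_prefixConnected words k (prefixConnected words k)

-- ===== LEMMAS AND PROOFS =====

-- the multiset of length-k prefixes of the admitted words
def pvPrefs (words : List String) (k : Int) : List String :=
  (words.filter (fun w => decide (k ≤ PySem.Str.len w))).map
    (fun w => PySem.Str.slice w none (some k))

-- the common value: number of distinct elements occurring at least twice
def pvN (ps : List String) : Nat :=
  (ps.toFinset.filter (fun p => 2 ≤ ps.count p)).card

-- A's loop body, on the prefix list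
def pvStepA (sd : PySem.Set String × PySem.Set String) (p : String) :
    PySem.Set String × PySem.Set String :=
  if sd.1.contains p then (sd.1, sd.2.add p) else (sd.1.add p, sd.2)

lemma loopA_eq_prefs (k : Int) :
    ∀ (words : List String) (sd : PySem.Set String × PySem.Set String),
      words.foldl
        (fun (sd : PySem.Set String × PySem.Set String) word =>
          if PySem.Str.len word < k then sd
          else
            let pre := PySem.Str.slice word none (some k)
            if sd.1.contains pre then (sd.1, sd.2.add pre)
            else (sd.1.add pre, sd.2)) sd
      = (pvPrefs words k).foldl pvStepA sd := by
  intro words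
  induction words with
  | nil => intro sd; rfl
  | cons w ws ih =>
    intro sd
    rw [List.foldl_cons]
    by_cases h : PySem.Str.len w < k
    · have hf : pvPrefs (w :: ws) k = pvPrefs ws k := by
        simp only [pvPrefs, List.filter_cons]
        rw [if_neg (by simp only [decide_eq_true_eq]; exact not_le.mpr h)]
      rw [if_pos h, hf]
      exact ih sd
    · have hf : pvPrefs (w :: ws) k
          = PySem.Str.slice w none (some k) :: pvPrefs ws k := by
        simp only [pvPrefs, List.filter_cons]
        rw [if_pos (by simp only [decide_eq_true_eq]; exact not_lt.mp h)]
        rfl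
      rw [if_neg h, hf, List.foldl_cons]
      exact ih _

lemma mem_doubles_loopA :
    ∀ (ps : List String) (sd : PySem.Set String × PySem.Set String) (p : String),
      p ∈ (ps.foldl pvStepA sd).2 ↔
        p ∈ sd.2 ∨ (p ∈ sd.1 ∧ 1 ≤ ps.count p) ∨ 2 ≤ ps.count p := by
  intro ps
  induction ps with
  | nil => intro sd p; simp
  | cons x xs ih =>
    intro sd p
    rw [List.foldl_cons, ih]
    by_cases hpx : p = x
    · subst hpx
      rw [List.count_cons_self, pvStepA]
      split_ifs with hx
      · have hxs : p ∈ sd.1 := by simpa using hx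
        simp [PySem.Set.mem_add, hxs]
      · have hxs : p ∉ sd.1 := by simpa using hx
        constructor
        · rintro (h | ⟨hm, hc⟩ | h)
          · exact Or.inl h
          · rcases (PySem.Set.mem_add sd.1 p p).mp hm with h' | _
            · exact absurd h' hxs
            · exact Or.inr (Or.inr (by omega))
          · exact Or.inr (Or.inr (by omega))
        · rintro (h | ⟨hm, _⟩ | h)
          · exact Or.inl h
          · exact absurd hm hxs
          · exact Or.inr (Or.inl ⟨(PySem.Set.mem_add sd.1 p p).mpr (Or.inr rfl), by omega⟩)
    · rw [List.count_cons_of_ne (fun he => hpx he.symm), pvStepA]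
      split_ifs with hx
      · simp only [PySem.Set.mem_add]
        constructor
        · rintro ((h | h) | h)
          · exact Or.inl h
          · exact absurd h hpx
          · exact Or.inr h
        · rintro (h | h)
          · exact Or.inl (Or.inl h)
          · exact Or.inr h
      · simp only [PySem.Set.mem_add]
        constructor
        · rintro (h | ⟨(h | h), hc⟩ | h)
          · exact Or.inl h
          · exact Or.inr (Or.inl ⟨h, hc⟩)
          · exact absurd h hpx
          · exact Or.inr (Or.inr h)
        · rintro (h | ⟨h, hc⟩ | h)
          · exact Or.inl h
          · exact Or.inr (Or.inl ⟨Or.inl h, hc⟩)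
          · exact Or.inr (Or.inr h)

lemma nodup_doubles_loopA :
    ∀ (ps : List String) (sd : PySem.Set String × PySem.Set String),
      sd.2.Nodup → ((ps.foldl pvStepA sd).2 : List String).Nodup := by
  intro ps
  induction ps with
  | nil => intro sd h; exact h
  | cons x xs ih =>
    intro sd h
    rw [List.foldl_cons, pvStepA]
    split_ifs with hx
    · exact ih _ (PySem.Set.nodup_add _ _ h)
    · exact ih _ h

-- A side: the doubles set has exactly pvN elements
lemma loopA_length_eq_pvN (ps : List String) :
    ((ps.foldl pvStepA (PySem.Set.empty, PySem.Set.empty)).2 : List String).length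
      = pvN ps := by
  have hnd : ((ps.foldl pvStepA (PySem.Set.empty, PySem.Set.empty)).2 : List String).Nodup :=
    nodup_doubles_loopA ps _ (by simp [PySem.Set.empty])
  have hmem : ∀ p, p ∈ (ps.foldl pvStepA (PySem.Set.empty, PySem.Set.empty)).2 ↔
      2 ≤ ps.count p := by
    intro p
    rw [mem_doubles_loopA]
    simp [PySem.Set.empty]
  rw [pvN, ← List.toFinset_card_of_nodup hnd]
  congr 1
  ext p
  simp only [List.mem_toFinset, Finset.mem_filter, hmem]
  exact ⟨fun h => ⟨List.count_pos_iff.mp (by omega), h⟩, fun h => h.2⟩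

-- B side: count in a ≠-filtered list is unchanged for other elements
lemma count_filter_ne (xs : List String) (x p : String) (h : p ≠ x) :
    (xs.filter (fun q => decide (q ≠ x))).count p = xs.count p :=
  List.count_filter (by simpa using h)

lemma pvLoopB_eq_pvN : ∀ (ps : List String), pvLoopB ps = (pvN ps : Int) := by
  intro ps
  induction hn : ps.length using Nat.strong_induction_on generalizing ps with
  | _ n ih =>
    match ps, hn with
    | [], _ => simp [pvLoopB, pvN]
    | x :: xs, hn =>
      rw [pvLoopB]
      have hflt : (x :: xs).filter (fun q => decide (q ≠ x)) = xs.filter (fun q => decide (q ≠ x)) := by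
        rw [List.filter_cons, if_neg (by simp)]
      have hlen : ((x :: xs).filter (fun q => decide (q ≠ x))).length < n := by
        rw [hflt]
        calc (xs.filter (fun q => decide (q ≠ x))).length ≤ xs.length := List.length_filter_le _ _
          _ < n := by rw [← hn, List.length_cons]; omega
      rw [ih _ hlen _ rfl]
      -- it remains: (if … then 1 else 0) + pvN t = pvN (x :: xs)
      set t := (x :: xs).filter (fun q => decide (q ≠ x)) with ht
      have hcount_t : ∀ p, p ≠ x → t.count p = (x :: xs).count p := fun p hp =>
        count_filter_ne (x :: xs) x p hp
      have hxt : x ∉ t := by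
        intro hx
        have := List.of_mem_filter hx
        simp at this
      have htfin : t.toFinset = (x :: xs).toFinset.erase x := by
        ext p
        by_cases hp : p = x
        · subst hp; simp [hxt]
        · simp only [List.mem_toFinset, Finset.mem_erase, ht, List.mem_filter,
            decide_eq_true_eq, ne_eq]
          tauto
      have hsplit : pvN (x :: xs)
          = (if 2 ≤ (x :: xs).count x then 1 else 0) + pvN t := by
        rw [pvN, pvN]
        have hx_mem : x ∈ (x :: xs).toFinset := by simp
        have hins : (x :: xs).toFinset = insert x ((x :: xs).toFinset.erase x) :=
          (Finset.insert_erase hx_mem).symm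
        rw [hins, Finset.filter_insert]
        have hrest : ((x :: xs).toFinset.erase x).filter (fun p => 2 ≤ (x :: xs).count p)
            = t.toFinset.filter (fun p => 2 ≤ t.count p) := by
          rw [htfin]
          apply Finset.filter_congr
          intro p hp
          have hpx : p ≠ x := (Finset.mem_erase.mp hp).1
          simp [hcount_t p hpx]
        split_ifs with hc
        · rw [Finset.card_insert_of_notMem
            (fun hmem => (Finset.mem_erase.mp (Finset.mem_filter.mp hmem).1).1 rfl), hrest]
          omega
        · rw [hrest]; omega
      rw [PySem.List.count_eq, hsplit]
      push_cast
      split_ifs <;> ring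

-- ===== VERDICT (by name: the statement is the Claim_ definition above) =====
theorem prefixConnected_spec : Claim_equal_prefixConnected := by
  intro words k _
  unfold Spec_prefixConnected prefixConnected prefixConnected_alt
  dsimp only
  rw [loopA_eq_prefs]
  have hB : pvLoopB (pvPrefs words k) = (pvN (pvPrefs words k) : Int) :=
    pvLoopB_eq_pvN _
  rw [show ((words.filter (fun w => decide (k ≤ PySem.Str.len w))).map
      (fun w => PySem.Str.slice w none (some k))) = pvPrefs words k from rfl, hB,
    loopA_length_eq_pvN]
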